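-- pv_equiv track=rewrite | github.com/greatertomi/problem-solving | algorithms/easy2/two-character.py | checkForAlternating
-- ===== SOURCE A (Python) =====
-- def checkForAlternating(string):
--     if string[0] == string[1]:
--         return False
--     char1 = string[0]
--     char2 = string[1]
--     for i in range(len(string)):
--         if i % 2 == 0 and string[i] != char1:
--             return False
--         if i % 2 == 1 and string[i] != char2:
--             return False
--     return True
-- ===== SOURCE B (Python) =====
-- def checkForAlternating(string):
--     if string[0] == string[1]:
--         return False
--     pattern = string[:2]
--     expected = (pattern * (len(string) // 2 + 1))[:len(string)]
--     return string == expected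
-- ===== Notes on version B (the rewrite author's own statement) =====
-- stated objective: alternative
-- what changed: Replaces the parity-branching index loop with building the full expected string by repeating the two-character prefix and doing one whole-string equality comparison (no per-index scan in Python code).
import Mathlib
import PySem

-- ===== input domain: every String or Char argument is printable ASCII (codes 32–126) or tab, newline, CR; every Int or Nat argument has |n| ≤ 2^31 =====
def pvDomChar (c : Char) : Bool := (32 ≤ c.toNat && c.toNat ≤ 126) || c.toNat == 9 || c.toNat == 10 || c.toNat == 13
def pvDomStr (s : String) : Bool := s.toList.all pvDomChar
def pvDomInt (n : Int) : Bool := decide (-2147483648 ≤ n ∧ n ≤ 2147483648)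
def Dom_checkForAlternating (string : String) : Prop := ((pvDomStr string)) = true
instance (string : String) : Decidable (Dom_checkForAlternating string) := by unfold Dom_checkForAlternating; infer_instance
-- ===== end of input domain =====

-- B replaces the parity-branching index loop with building the expected string by
-- repeating the two-character prefix and comparing once (alternative, same cost).

-- ===== PORT A =====
-- the index loop with its two early 'return False' branches
def pvLoopA (cs : List Char) (c1 c2 : Char) : List Int → Bool
  | [] => true
  | i :: rest =>
    if PySem.Int.mod i 2 = 0 ∧ PySem.List.pyGetD cs i 'A' ≠ c1 then false
    else if PySem.Int.mod i 2 = 1 ∧ PySem.List.pyGetD cs i 'A' ≠ c2 then false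
    else pvLoopA cs c1 c2 rest

def checkForAlternating (string : String) : Bool :=
  let cs := string.toList
  if PySem.List.pyGetD cs 0 'A' = PySem.List.pyGetD cs 1 'A' then false
  else
    let c1 := PySem.List.pyGetD cs 0 'A'
    let c2 := PySem.List.pyGetD cs 1 'A'
    pvLoopA cs c1 c2 (PySem.List.pyRange 0 cs.length 1)

-- ===== PORT B =====
-- string[:2] → PySem.List.slice; 'pattern * k' is flatten of k replicas (exact for k ≥ 0);
-- len(string) // 2 + 1 on the nonnegative length equals Nat division, exact here.
def checkForAlternating_alt (string : String) : Bool :=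
  let cs := string.toList
  if PySem.List.pyGetD cs 0 'A' = PySem.List.pyGetD cs 1 'A' then false
  else
    let pattern := PySem.List.slice cs none (some 2)
    let expected := ((List.replicate (cs.length / 2 + 1) pattern).flatten).take cs.length
    decide (cs = expected)

-- ===== PRECONDITION & SPEC =====
-- Pre_ excludes strings of length < 2, on which A (and B) raise IndexError at string[0]/string[1].
def Pre_checkForAlternating (string : String) : Prop := 2 ≤ string.toList.length
instance (string : String) : Decidable (Pre_checkForAlternating string) := by unfold Pre_checkForAlternating; infer_instance
def pvWitness_checkForAlternating : String := "ab"

def Spec_checkForAlternating (string : String) (out : Bool) : Prop := out = checkForAlternating_alt string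
instance (string : String) (out : Bool) : Decidable (Spec_checkForAlternating string out) := by unfold Spec_checkForAlternating; infer_instance

-- ===== CLAIM (what is proved, stated in full; the proofs are below) =====
def Claim_equal_checkForAlternating : Prop := ∀ (string : String), Dom_checkForAlternating string → Pre_checkForAlternating string → Spec_checkForAlternating string (checkForAlternating string)

-- ===== LEMMAS AND PROOFS =====

-- A's early-return loop is an all-fold over the same index list
theorem pvLoopA_eq_all (cs : List Char) (c1 c2 : Char) (l : List Int) :
    pvLoopA cs c1 c2 l =
      l.all (fun i => PySem.List.pyGetD cs i 'A' = if PySem.Int.mod i 2 = 0 then c1 else c2) := by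
  induction l with
  | nil => rfl
  | cons i rest ih =>
    have h0 : 0 ≤ PySem.Int.mod i 2 := PySem.Int.mod_nonneg i (by norm_num)
    have h2 : PySem.Int.mod i 2 < 2 := PySem.Int.mod_lt i (by norm_num)
    rcases (by omega : PySem.Int.mod i 2 = 0 ∨ PySem.Int.mod i 2 = 1) with h | h
    · by_cases hc : PySem.List.pyGetD cs i 'A' = c1
      · rw [pvLoopA, if_neg (by simp [hc]), if_neg (by simp only [h]; simp), ih, List.all_cons]
        simp only [h]
        simp [hc]
      · rw [pvLoopA, if_pos ⟨h, hc⟩, List.all_cons]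
        simp only [h]
        simp [hc]
    · by_cases hc : PySem.List.pyGetD cs i 'A' = c2
      · rw [pvLoopA, if_neg (by simp only [h]; simp), if_neg (by simp [hc]), ih, List.all_cons]
        simp only [h]
        simp [hc]
      · rw [pvLoopA, if_neg (by simp only [h]; simp), if_pos ⟨h, hc⟩, List.all_cons]
        simp only [h]
        simp [hc]

-- the repeated two-character block: length and element characterisation
theorem pv_flat_length (a b : Char) (m : Nat) :
    ((List.replicate m [a, b]).flatten).length = 2 * m := by
  induction m with
  | zero => rfl
  | succ m ih => simp [List.replicate_succ, ih]; omega

theorem pv_flat_getD (a b : Char) (m k : Nat) (hk : k < 2 * m) :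
    ((List.replicate m [a, b]).flatten).getD k 'A' = if k % 2 = 0 then a else b := by
  induction m generalizing k with
  | zero => omega
  | succ m ih =>
    rw [List.replicate_succ, List.flatten_cons]
    match k with
    | 0 => rfl
    | 1 => rfl
    | (j+2) =>
      have : ([a, b] ++ (List.replicate m [a, b]).flatten).getD (j + 2) 'A'
          = ((List.replicate m [a, b]).flatten).getD j 'A' := rfl
      rw [this, ih j (by omega)]
      have : (j + 2) % 2 = j % 2 := by omega
      rw [this]

-- ===== VERDICT (by name: the statement is the Claim_ definition above) =====
theorem checkForAlternating_spec : Claim_equal_checkForAlternating := by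
  intro s _ hpre
  unfold Spec_checkForAlternating checkForAlternating checkForAlternating_alt
  set cs := s.toList with hcs
  have hn : 2 ≤ cs.length := hpre
  have hg0 : PySem.List.pyGetD cs (0 : Int) 'A' = cs.getD 0 'A' := by
    exact_mod_cast PySem.List.pyGetD_natCast cs 0 'A'
  have hg1 : PySem.List.pyGetD cs (1 : Int) 'A' = cs.getD 1 'A' := by
    exact_mod_cast PySem.List.pyGetD_natCast cs 1 'A'
  by_cases h01 : PySem.List.pyGetD cs 0 'A' = PySem.List.pyGetD cs 1 'A'
  · simp [h01]
  · simp only [if_neg h01]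
    -- unfold the slice: cs[:2] = [cs.getD 0, cs.getD 1]
    obtain ⟨a, b, t, hcsab⟩ : ∃ a b t, cs = a :: b :: t := by
      match h : cs with
      | [] => simp at hn
      | [a] => simp at hn
      | a :: b :: t => exact ⟨a, b, t, rfl⟩
    have hslice : PySem.List.slice cs none (some 2) = [a, b] := by
      have := PySem.List.slice_to_natCast cs 2
      rw [hcsab] at this ⊢
      simpa using this
    have hga : cs.getD 0 'A' = a := by rw [hcsab]; rfl
    have hgb : cs.getD 1 'A' = b := by rw [hcsab]; rfl
    rw [hslice]
    set n := cs.length with hnn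
    set m := n / 2 + 1 with hm
    have hn2m : n ≤ 2 * m := by omega
    set L := (List.replicate m [a, b]).flatten with hL
    have hLlen : L.length = 2 * m := pv_flat_length a b m
    rw [pvLoopA_eq_all, Bool.eq_iff_iff, List.all_eq_true, decide_eq_true_iff]
    constructor
    · -- A's per-index property gives the list equality
      intro hA
      apply List.ext_getElem
      · simp [hLlen]; omega
      · intro k hk1 hk2
        have hkn : k < n := by simpa using hk1
        have e := hA (k : Int) (by rw [PySem.List.mem_pyRange_one]; omega)
        have hm1 : PySem.Int.mod (k : Int) 2 = ((k % 2 : Nat) : Int) := by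
          exact_mod_cast PySem.Int.mod_natCast k 2
        simp only [decide_eq_true_eq, hm1, Nat.cast_eq_zero] at e
        rw [PySem.List.pyGetD_natCast, hg0, hg1, hga, hgb] at e
        have hgl : (L.take n)[k] = L.getD k 'A' := by
          rw [List.getElem_take, List.getD_eq_getElem L 'A' (by omega)]
        rw [hgl, pv_flat_getD a b m k (by omega), ← e,
          List.getD_eq_getElem cs 'A' (by omega)]
    · -- the list equality gives A's per-index property
      intro hB i hmem
      rw [PySem.List.mem_pyRange_one] at hmem
      have hik : i = ((i.toNat : Nat) : Int) := by omega
      set k : Nat := i.toNat with hkdef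
      have hkn : k < n := by omega
      have hm1 : PySem.Int.mod (k : Int) 2 = ((k % 2 : Nat) : Int) := by
        exact_mod_cast PySem.Int.mod_natCast k 2
      simp only [decide_eq_true_eq]
      rw [hik, PySem.List.pyGetD_natCast, hm1, hg0, hg1, hga, hgb]
      have : cs.getD k 'A' = (L.take n).getD k 'A' := by rw [← hB]
      rw [this, List.getD_eq_getElem _ 'A' (by simp [hLlen]; omega),
        List.getElem_take, ← List.getD_eq_getElem L 'A' (by omega),
        pv_flat_getD a b m k (by omega)]
      simp only [Nat.cast_eq_zero]
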